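-- pv_equiv track=rewrite | github.com/stevela18/aoc-2024 | day5.py | make_rules_dict
-- ===== SOURCE A (Python) =====
-- def make_rules_dict(page_ordering_rules):
--     rules_dict = dict()
--     for rule in page_ordering_rules:
--         key = rule[0]
--         value = rule[1]
--         if key in rules_dict.keys():
--             rules_dict[key].add(value)
--         else:
--             rules_dict[key] = set([value])
--     return rules_dict
-- ===== SOURCE B (Python) =====
-- def make_rules_dict(page_ordering_rules):
--     rules = list(page_ordering_rules)
--     keys = list(dict.fromkeys(k for k, _ in rules))
--     return {k: {v for kk, v in rules if kk == k} for k in keys}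
-- ===== Notes on version B (the rewrite author's own statement) =====
-- stated objective: alternative
-- what changed: Instead of one grouping pass that mutates a dict of sets entry by entry, B first collects the distinct keys in first-occurrence order and then builds the whole dict in one comprehension, re-scanning the rule list once per distinct key to gather that key's value set.
import Mathlib
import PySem

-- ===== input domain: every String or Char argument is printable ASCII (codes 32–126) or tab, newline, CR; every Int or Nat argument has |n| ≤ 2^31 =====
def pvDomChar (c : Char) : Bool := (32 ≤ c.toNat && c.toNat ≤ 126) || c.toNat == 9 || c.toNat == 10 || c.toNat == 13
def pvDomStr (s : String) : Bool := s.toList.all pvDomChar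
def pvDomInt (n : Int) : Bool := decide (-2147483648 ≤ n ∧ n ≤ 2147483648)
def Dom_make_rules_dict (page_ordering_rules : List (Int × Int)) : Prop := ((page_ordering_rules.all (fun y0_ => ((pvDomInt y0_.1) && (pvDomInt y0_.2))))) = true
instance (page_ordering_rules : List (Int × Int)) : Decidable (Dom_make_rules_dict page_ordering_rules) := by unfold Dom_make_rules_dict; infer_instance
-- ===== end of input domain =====

-- B replaces A's single mutating grouping pass by a distinct-keys pass plus a per-key re-scan
-- of the rule list (alternative decomposition; same return value, no mutation involved).


-- ===== PORT A =====
-- literal port of A: fold over the rules, mutating a dict of sets (add to the set if the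
-- key is present, otherwise insert a fresh one-element set); return the dict's items.
def make_rules_dict (page_ordering_rules : List (Int × Int)) : List (Int × List Int) :=
  (page_ordering_rules.foldl
    (fun rules_dict rule =>
      if rules_dict.keys.contains rule.1 then
        rules_dict.modify rule.1 [] (fun s => PySem.Set.add s rule.2)
      else
        rules_dict.insert rule.1 (PySem.Set.ofList [rule.2]))
    PySem.Dict.empty).items

-- ===== PORT B =====
-- literal port of B: distinct keys in first-occurrence order (dict.fromkeys), then one
-- dict-comprehension entry per key, each re-scanning the rules for its value set.
def make_rules_dict_alt (page_ordering_rules : List (Int × Int)) : List (Int × List Int) :=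
  let rules := page_ordering_rules
  let keys := PySem.List.dedup (rules.map (fun p => p.1))
  keys.map (fun k => (k, PySem.Set.ofList ((rules.filter (fun p => p.1 == k)).map (fun p => p.2))))

-- ===== PRECONDITION & SPEC =====
def Spec_make_rules_dict (page_ordering_rules : List (Int × Int)) (out : List (Int × List Int)) : Prop := out = make_rules_dict_alt page_ordering_rules
instance (page_ordering_rules : List (Int × Int)) (out : List (Int × List Int)) : Decidable (Spec_make_rules_dict page_ordering_rules out) := by unfold Spec_make_rules_dict; infer_instance

-- ===== CLAIM (what is proved, stated in full; the proofs are below) =====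
def Claim_equal_make_rules_dict : Prop := ∀ (page_ordering_rules : List (Int × Int)), Dom_make_rules_dict page_ordering_rules → Spec_make_rules_dict page_ordering_rules (make_rules_dict page_ordering_rules)

-- ===== LEMMAS AND PROOFS =====

-- the value B assigns to key k
def pvVal (rules : List (Int × Int)) (k : Int) : List Int :=
  PySem.Set.ofList ((rules.filter (fun p => p.1 == k)).map (fun p => p.2))

theorem pvAlt_eq (rules : List (Int × Int)) :
    make_rules_dict_alt rules
      = (PySem.List.dedup (rules.map (fun p => p.1))).map (fun k => (k, pvVal rules k)) := rfl

-- dedup over an appended element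
theorem pvDedup_append (l : List Int) (k : Int) :
    PySem.List.dedup (l ++ [k])
      = if k ∈ l then PySem.List.dedup l else PySem.List.dedup l ++ [k] := by
  rw [PySem.List.dedup_eq_ofList, PySem.List.dedup_eq_ofList]
  show (l ++ [k]).foldl PySem.Set.add PySem.Set.empty = _
  rw [List.foldl_append]
  show PySem.Set.add (PySem.Set.ofList l) k = _
  rw [PySem.Set.add]
  by_cases hk : k ∈ l
  · rw [if_pos hk, if_pos]
    exact List.contains_iff_mem.mpr ((PySem.Set.mem_ofList l k).mpr hk)
  · rw [if_neg hk, if_neg]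
    simp only [PySem.Set.contains, Bool.not_eq_true]
    exact (Bool.not_eq_true _).mp (fun h => hk ((PySem.Set.mem_ofList l k).mp (List.contains_iff_mem.mp h)))

-- B's value set over an appended rule, key differs
theorem pvVal_append_ne (xs : List (Int × Int)) (k v a : Int) (h : a ≠ k) :
    pvVal (xs ++ [(k, v)]) a = pvVal xs a := by
  simp [pvVal, List.filter_append, show (k == a) = false by simp [Ne.symm h]]

-- B's value set over an appended rule, same key
theorem pvVal_append_self (xs : List (Int × Int)) (k v : Int) :
    pvVal (xs ++ [(k, v)]) k = PySem.Set.add (pvVal xs k) v := by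
  simp [pvVal, List.filter_append, PySem.Set.ofList, List.foldl_append]

-- B's value set at an absent key
theorem pvVal_not_mem (xs : List (Int × Int)) (k : Int) (h : k ∉ xs.map (fun p => p.1)) :
    pvVal xs k = [] := by
  have : xs.filter (fun p => p.1 == k) = [] := by
    rw [List.filter_eq_nil_iff]
    intro p hp
    simp only [beq_iff_eq]
    exact fun he => h (List.mem_map.mpr ⟨p, hp, he⟩)
  simp [pvVal, this, PySem.Set.ofList, PySem.Set.empty]

-- invariant: after folding A's loop, the dict's items are exactly B's table
theorem pvLoop_items (rules : List (Int × Int)) :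
    (rules.foldl
      (fun rules_dict rule =>
        if rules_dict.keys.contains rule.1 then
          rules_dict.modify rule.1 [] (fun s => PySem.Set.add s rule.2)
        else
          rules_dict.insert rule.1 (PySem.Set.ofList [rule.2]))
      PySem.Dict.empty).items
      = (PySem.List.dedup (rules.map (fun p => p.1))).map (fun k => (k, pvVal rules k)) := by
  induction rules using List.reverseRecOn with
  | nil => rfl
  | append_singleton xs x ih =>
    obtain ⟨k, v⟩ := x
    rw [List.foldl_append]
    have hd : (xs.foldl
        (fun rules_dict rule =>
          if rules_dict.keys.contains rule.1 then
            rules_dict.modify rule.1 [] (fun s => PySem.Set.add s rule.2)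
          else
            rules_dict.insert rule.1 (PySem.Set.ofList [rule.2]))
        PySem.Dict.empty)
        = PySem.Dict.mk ((PySem.List.dedup (xs.map (fun p => p.1))).map (fun a => (a, pvVal xs a))) :=
      PySem.Dict.ext (by simpa using ih)
    rw [hd]
    simp only [List.foldl_cons, List.foldl_nil]
    have hmapfst : (xs ++ [(k, v)]).map (fun p : Int × Int => p.1) = xs.map (fun p => p.1) ++ [k] := by
      simp
    have hkeys : (PySem.Dict.mk ((PySem.List.dedup (xs.map (fun p => p.1))).map (fun a => (a, pvVal xs a)))).keys
        = PySem.List.dedup (xs.map (fun p => p.1)) := by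
      simp [PySem.Dict.keys, List.map_map, Function.comp_def]
    have hmemded : ∀ a : Int, a ∈ PySem.List.dedup (xs.map (fun p => p.1)) ↔ a ∈ xs.map (fun p => p.1) := by
      intro a
      rw [PySem.List.dedup_eq_ofList, PySem.Set.mem_ofList]
    by_cases hk : k ∈ xs.map (fun p => p.1)
    · -- key already present: A modifies the existing set in place
      have hkd : k ∈ PySem.List.dedup (xs.map (fun p => p.1)) := (hmemded k).mpr hk
      have hcond : ((PySem.Dict.mk ((PySem.List.dedup (xs.map (fun p => p.1))).map (fun a => (a, pvVal xs a)))).keys).contains k = true := by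
        rw [hkeys]; exact List.contains_iff_mem.mpr hkd
      rw [if_pos hcond]
      have hnd : (PySem.Dict.mk ((PySem.List.dedup (xs.map (fun p => p.1))).map (fun a => (a, pvVal xs a)))).keys.Nodup := by
        rw [hkeys]; exact PySem.List.nodup_dedup _
      have hget : (PySem.Dict.mk ((PySem.List.dedup (xs.map (fun p => p.1))).map (fun a => (a, pvVal xs a)))).getD k [] = pvVal xs k := by
        refine PySem.Dict.getD_of_mem_items _ ?_ hnd []
        exact List.mem_map.mpr ⟨k, hkd, rfl⟩
      have hcont : (PySem.Dict.mk ((PySem.List.dedup (xs.map (fun p => p.1))).map (fun a => (a, pvVal xs a)))).contains k = true := by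
        refine (PySem.Dict.contains_iff_mem_keys _ _).mpr ?_
        rw [hkeys]; exact hkd
      rw [PySem.Dict.modify, hget, PySem.Dict.insert, if_pos hcont]
      rw [hmapfst, pvDedup_append, if_pos hk]
      show ((PySem.List.dedup (xs.map (fun p => p.1))).map (fun a => (a, pvVal xs a))).map
          (fun p => if p.1 == k then (k, PySem.Set.add (pvVal xs k) v) else p)
        = (PySem.List.dedup (xs.map (fun p => p.1))).map (fun a => (a, pvVal (xs ++ [(k, v)]) a))
      rw [List.map_map]
      refine List.map_congr_left (fun a _ => ?_)
      by_cases hak : a = k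
      · subst hak
        simp [pvVal_append_self]
      · simp [Function.comp, hak, pvVal_append_ne xs k v a hak]
    · -- fresh key: A appends a new one-element set
      have hkd : k ∉ PySem.List.dedup (xs.map (fun p => p.1)) := fun h => hk ((hmemded k).mp h)
      have hcond : ((PySem.Dict.mk ((PySem.List.dedup (xs.map (fun p => p.1))).map (fun a => (a, pvVal xs a)))).keys).contains k = false := by
        rw [hkeys]
        exact (Bool.not_eq_true _).mp (fun h => hkd (List.contains_iff_mem.mp h))
      rw [if_neg (by rw [hcond]; simp), PySem.Dict.insert]
      have hcont : (PySem.Dict.mk ((PySem.List.dedup (xs.map (fun p => p.1))).map (fun a => (a, pvVal xs a)))).contains k = false := by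
        refine (Bool.not_eq_true _).mp (fun h => hkd ?_)
        have := (PySem.Dict.contains_iff_mem_keys _ _).mp h
        rwa [hkeys] at this
      rw [if_neg (by rw [hcont]; simp)]
      rw [hmapfst, pvDedup_append, if_neg hk, List.map_append]
      show ((PySem.List.dedup (xs.map (fun p => p.1))).map (fun a => (a, pvVal xs a))) ++ [(k, PySem.Set.ofList [v])]
        = ((PySem.List.dedup (xs.map (fun p => p.1))).map (fun a => (a, pvVal (xs ++ [(k, v)]) a)))
          ++ ([k].map (fun a => (a, pvVal (xs ++ [(k, v)]) a)))
      congr 1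
      · refine List.map_congr_left (fun a ha => ?_)
        have hak : a ≠ k := fun he => hk (by rw [← he]; exact (hmemded a).mp ha)
        rw [pvVal_append_ne xs k v a hak]
      · show [(k, PySem.Set.ofList [v])] = [(k, pvVal (xs ++ [(k, v)]) k)]
        rw [pvVal_append_self, pvVal_not_mem xs k hk]
        rfl

-- ===== VERDICT (by name: the statement is the Claim_ definition above) =====
theorem make_rules_dict_spec : Claim_equal_make_rules_dict := by
  intro rules _
  unfold Spec_make_rules_dict
  rw [pvAlt_eq, make_rules_dict, pvLoop_items]
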